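-- pv_equiv track=rewrite | github.com/nakatsup3/pytest_etc | tube.py | get_space_bits
-- ===== SOURCE A (Python) =====
-- CELL_NUM = 4
--
-- def get_space_bits(values: list):
--     result = 0b0
--     for i in range(CELL_NUM, 0, -1):
--         if len(values) < i:
--             result = result | (1 << i-1)
--         else:
--             break
--     return result
-- ===== SOURCE B (Python) =====
-- CELL_NUM = 4
--
-- def get_space_bits(values: list):
--     full = (1 << CELL_NUM) - 1
--     filled = (1 << min(len(values), CELL_NUM)) - 1
--     return full ^ filled
-- ===== Notes on version B (the rewrite author's own statement) =====
-- stated objective: simpler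
-- what changed: Replaced the descending loop-with-break by a single closed-form bitmask expression: full mask XOR the mask of filled (capped) cells.
import Mathlib
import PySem

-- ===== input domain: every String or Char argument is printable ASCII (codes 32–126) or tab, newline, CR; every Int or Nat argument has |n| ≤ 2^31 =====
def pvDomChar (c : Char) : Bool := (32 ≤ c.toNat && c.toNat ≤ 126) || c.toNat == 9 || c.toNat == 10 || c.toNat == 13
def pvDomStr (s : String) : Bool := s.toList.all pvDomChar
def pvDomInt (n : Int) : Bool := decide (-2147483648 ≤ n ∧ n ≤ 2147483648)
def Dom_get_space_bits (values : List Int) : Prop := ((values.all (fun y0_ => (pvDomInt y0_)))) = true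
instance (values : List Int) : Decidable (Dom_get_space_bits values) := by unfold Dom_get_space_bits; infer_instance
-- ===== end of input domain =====

-- B replaces A's descending loop-with-break by one closed-form bitmask expression (objective: simpler).

-- ===== PORT A =====
-- the for-loop with break: recursion over range(CELL_NUM, 0, -1); the shift exponent i-1 is
-- nonnegative for every i the range produces, so .toNat is exact here
def pvLoopA (values : List Int) : List Int → Int → Int
  | [], result => result
  | i :: rest, result =>
    if (values.length : Int) < i then
      pvLoopA values rest (Int.lor result ((1 : Int) <<< (i - 1).toNat))
    else result

def get_space_bits (values : List Int) : Int :=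
  pvLoopA values (PySem.List.pyRange 4 0 (-1)) 0

-- ===== PORT B =====
def get_space_bits_alt (values : List Int) : Int :=
  let full : Int := ((1 : Int) <<< (4 : Nat)) - 1
  let filled : Int := ((1 : Int) <<< (min values.length 4)) - 1
  Int.xor full filled

-- ===== PRECONDITION & SPEC =====
def Spec_get_space_bits (values : List Int) (out : Int) : Prop := out = get_space_bits_alt values
instance (values : List Int) (out : Int) : Decidable (Spec_get_space_bits values out) := by unfold Spec_get_space_bits; infer_instance

-- ===== CLAIM (what is proved, stated in full; the proofs are below) =====
def Claim_equal_get_space_bits : Prop := ∀ (values : List Int), Dom_get_space_bits values → Spec_get_space_bits values (get_space_bits values)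

-- ===== LEMMAS AND PROOFS =====
theorem pv_main (values : List Int) :
    get_space_bits values = get_space_bits_alt values := by
  unfold get_space_bits get_space_bits_alt
  have hr : PySem.List.pyRange 4 0 (-1) = [4, 3, 2, 1] := by decide
  rw [hr]
  simp only [pvLoopA]
  generalize values.length = n
  by_cases h : n < 4
  · interval_cases n <;> decide
  · have hn4 : ¬ ((n : Int) < 4) := by exact_mod_cast h
    have h4 : min n 4 = 4 := by omega
    rw [if_neg hn4, h4]
    decide

-- ===== VERDICT (by name: the statement is the Claim_ definition above) =====
theorem get_space_bits_spec : Claim_equal_get_space_bits := by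
  intro values _
  unfold Spec_get_space_bits
  exact pv_main values
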